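-- pv_equiv track=rewrite | github.com/MediaMonitoringAndAnalysis/CLEAR-AutomatedAnalysis | src/analysis/merge_numbers.py | _pick_preferred
-- ===== SOURCE A (Python) =====
-- from collections import Counter
--
-- def _pick_preferred(values: list[str], preference: list[str], fallback_strategy="most_common") -> str:
--     """
--     Pick the best value from a list based on an ordered preference list.
--     Falls back to most-common or first non-null value if none match.
--     """
--     non_null = [v for v in values if v and v != "-"]
--     if not non_null:
--         return "-"
--
--     for preferred in preference:
--         matches = [v for v in non_null if v.lower() == preferred.lower()]
--         if matches:
--             return matches[0]
--
--     if fallback_strategy == "most_common":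
--         return Counter(non_null).most_common(1)[0][0]
--     return non_null[0]
-- ===== SOURCE B (Python) =====
-- from collections import Counter
--
--
-- def _pick_preferred(values: list[str], preference: list[str], fallback_strategy="most_common") -> str:
--     """Rank-dict re-implementation: rank each value by the first index of its
--     lowercased form in `preference`, keep the value with the smallest rank
--     (earlier non_null values win ties), else fall back."""
--     non_null = [v for v in values if v and v != "-"]
--     if not non_null:
--         return "-"
--
--     pref_rank = {}
--     for i, p in enumerate(preference):
--         key = p.lower()
--         if key not in pref_rank:
--             pref_rank[key] = i
--
--     best_rank = None
--     best_value = None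
--     for v in non_null:
--         r = pref_rank.get(v.lower())
--         if r is not None and (best_rank is None or r < best_rank):
--             best_rank, best_value = r, v
--
--     if best_value is not None:
--         return best_value
--
--     if fallback_strategy == "most_common":
--         return Counter(non_null).most_common(1)[0][0]
--     return non_null[0]
-- ===== Notes on version B (the rewrite author's own statement) =====
-- stated objective: alternative
-- what changed: Replaces the per-preference rescans of non_null with a first-index rank dict over preference plus a single argmin pass over non_null (strict-less so earlier values win ties).
import Mathlib
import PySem

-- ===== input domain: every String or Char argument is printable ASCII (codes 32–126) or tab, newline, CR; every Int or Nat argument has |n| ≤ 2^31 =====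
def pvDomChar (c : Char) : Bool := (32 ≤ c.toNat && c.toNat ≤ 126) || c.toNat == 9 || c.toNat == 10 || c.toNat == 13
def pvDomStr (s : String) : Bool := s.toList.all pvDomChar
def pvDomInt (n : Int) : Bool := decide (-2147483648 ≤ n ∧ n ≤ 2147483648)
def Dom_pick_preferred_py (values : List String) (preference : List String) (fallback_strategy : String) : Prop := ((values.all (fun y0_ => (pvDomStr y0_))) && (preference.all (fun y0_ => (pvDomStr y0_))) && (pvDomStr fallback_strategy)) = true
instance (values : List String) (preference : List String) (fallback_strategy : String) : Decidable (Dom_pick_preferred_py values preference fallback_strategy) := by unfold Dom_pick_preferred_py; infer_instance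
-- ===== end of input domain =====

-- B replaces A's per-preference rescans of non_null by a first-index rank dict plus one
-- argmin pass over non_null (objective: alternative). Fallback branches are unchanged.

-- ===== PORT A =====
-- Counter(xs).most_common(1)[0][0]: first key (in first-occurrence order) with maximal count
def pyMostCommon1 (xs : List String) : String :=
  match PySem.List.max? (PySem.Dict.counter xs).items (fun p => p.2) with
  | some p => p.1
  | none => "-"    -- unreachable: only called with xs ≠ []

-- the "for preferred in preference" loop of A
def aPrefLoop (non_null : List String) : List String → Option String
  | [] => none
  | p :: ps =>
    match non_null.filter (fun v => PySem.Str.lower v == PySem.Str.lower p) with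
    | m :: _ => some m
    | [] => aPrefLoop non_null ps

def pick_preferred_py (values : List String) (preference : List String) (fallback_strategy : String) : String :=
  let non_null := values.filter (fun v => !(v == "") && !(v == "-"))
  if non_null.isEmpty then "-"
  else
    match aPrefLoop non_null preference with
    | some m => m
    | none =>
      if fallback_strategy == "most_common" then pyMostCommon1 non_null
      else non_null.headD "-"

-- ===== PORT B =====
-- pref_rank: lowercased preference entry ↦ its first index
def bPrefRank (preference : List String) : PySem.Dict String Int :=
  (preference.foldl
    (fun (st : PySem.Dict String Int × Int) p =>
      let key := PySem.Str.lower p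
      (if st.1.contains key then st.1 else st.1.insert key st.2, st.2 + 1))
    (PySem.Dict.empty, 0)).1

-- the single argmin pass over non_null (strict <, so earlier values win ties)
def bBestLoop (d : PySem.Dict String Int) (non_null : List String) : Option (Int × String) :=
  non_null.foldl
    (fun best v =>
      match d.get? (PySem.Str.lower v) with
      | none => best
      | some r =>
        match best with
        | none => some (r, v)
        | some (br, _) => if r < br then some (r, v) else best)
    none

def pick_preferred_py_alt (values : List String) (preference : List String) (fallback_strategy : String) : String :=
  let non_null := values.filter (fun v => !(v == "") && !(v == "-"))
  if non_null.isEmpty then "-"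
  else
    match bBestLoop (bPrefRank preference) non_null with
    | some (_, bv) => bv
    | none =>
      if fallback_strategy == "most_common" then pyMostCommon1 non_null
      else non_null.headD "-"

-- ===== PRECONDITION & SPEC =====
def Spec_pick_preferred_py (values : List String) (preference : List String) (fallback_strategy : String) (out : String) : Prop := out = pick_preferred_py_alt values preference fallback_strategy
instance (values : List String) (preference : List String) (fallback_strategy : String) (out : String) : Decidable (Spec_pick_preferred_py values preference fallback_strategy out) := by unfold Spec_pick_preferred_py; infer_instance

-- ===== CLAIM (what is proved, stated in full; the proofs are below) =====
def Claim_equal_pick_preferred_py : Prop := ∀ (values : List String) (preference : List String) (fallback_strategy : String), Dom_pick_preferred_py values preference fallback_strategy → Spec_pick_preferred_py values preference fallback_strategy (pick_preferred_py values preference fallback_strategy)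

-- ===== LEMMAS AND PROOFS =====

-- first index i ≥ start such that (preference[i]).lower() = k
def findIdxFrom (k : String) : List String → Int → Option Int
  | [], _ => none
  | p :: ps, i => if PySem.Str.lower p == k then some i else findIdxFrom k ps (i + 1)

-- generalized best-loop with an abstract rank function and accumulator
def genBest (rank : String → Option Int) (acc : Option (Int × String)) : List String → Option (Int × String)
  | [] => acc
  | v :: vs =>
    genBest rank
      (match rank v with
       | none => acc
       | some r =>
         match acc with
         | none => some (r, v)
         | some (br, _) => if r < br then some (r, v) else acc) vs

lemma bBestLoop_eq_genBest (d : PySem.Dict String Int) (nn : List String) :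
    bBestLoop d nn = genBest (fun v => d.get? (PySem.Str.lower v)) none nn := by
  show List.foldl _ none nn = _
  generalize (none : Option (Int × String)) = acc
  induction nn generalizing acc with
  | nil => rfl
  | cons v vs ih => simp [List.foldl, genBest, ih]

lemma bPrefRank_get? (preference : List String) (k : String) :
    (bPrefRank preference).get? k = findIdxFrom k preference 0 := by
  have main : ∀ (ps : List String) (d : PySem.Dict String Int) (i : Int),
      ((ps.foldl
        (fun (st : PySem.Dict String Int × Int) p =>
          let key := PySem.Str.lower p
          (if st.1.contains key then st.1 else st.1.insert key st.2, st.2 + 1))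
        (d, i)).1).get? k =
      (if d.contains k then d.get? k else findIdxFrom k ps i) := by
    intro ps
    induction ps with
    | nil =>
      intro d i
      cases hc : d.contains k
      · simp [findIdxFrom, hc, (PySem.Dict.get?_eq_none_iff_contains d k).mpr (by simp [hc])]
      · simp [findIdxFrom, hc]
    | cons p ps ih =>
      intro d i
      simp only [List.foldl]
      by_cases hc : d.contains (PySem.Str.lower p)
      · simp only [hc, if_true]
        rw [ih]
        by_cases hk : PySem.Str.lower p == k
        · have hk' : PySem.Str.lower p = k := by simpa using hk
          rw [← hk'] at *
          simp [findIdxFrom, hc]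
        · simp [findIdxFrom, hk]
      · simp only [hc, if_false]
        rw [ih]
        by_cases hk : PySem.Str.lower p == k
        · have hk' : PySem.Str.lower p = k := by simpa using hk
          subst hk'
          simp [findIdxFrom, PySem.Dict.contains_insert, PySem.Dict.get?_insert_self, hc]
        · have hne : ¬ (k = PySem.Str.lower p) := fun h => by simp [h] at hk
          simp [findIdxFrom, hk, PySem.Dict.contains_insert,
            PySem.Dict.get?_insert_of_ne _ _ hne, hne]
  have := main preference PySem.Dict.empty 0
  simpa [bPrefRank, PySem.Dict.contains_empty] using this

lemma findIdxFrom_ge (k : String) (ps : List String) (i r : Int)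
    (h : findIdxFrom k ps i = some r) : i ≤ r := by
  induction ps generalizing i with
  | nil => simp [findIdxFrom] at h
  | cons p ps ih =>
    simp only [findIdxFrom] at h
    split at h
    · simp at h; omega
    · have := ih (i + 1) h
      omega
  
lemma findIdxFrom_shift (k : String) (ps : List String) (i : Int) :
    findIdxFrom k ps (i + 1) = (findIdxFrom k ps i).map (· + 1) := by
  induction ps generalizing i with
  | nil => rfl
  | cons p ps ih =>
    simp only [findIdxFrom]
    split
    · rfl
    · exact ih (i + 1)

lemma genBest_congr_mem (rank rank' : String → Option Int) (nn : List String)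
    (acc : Option (Int × String)) (h : ∀ v ∈ nn, rank v = rank' v) :
    genBest rank acc nn = genBest rank' acc nn := by
  induction nn generalizing acc with
  | nil => rfl
  | cons v vs ih =>
    simp only [genBest]
    rw [h v (by simp)]
    exact ih _ (fun w hw => h w (by simp [hw]))

lemma genBest_none (rank : String → Option Int) (nn : List String)
    (acc : Option (Int × String)) (h : ∀ v ∈ nn, rank v = none) :
    genBest rank acc nn = acc := by
  induction nn generalizing acc with
  | nil => rfl
  | cons v vs ih =>
    simp only [genBest, h v (by simp)]
    exact ih _ (fun w hw => h w (by simp [hw]))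

lemma genBest_stay_zero (rank : String → Option Int) (nn : List String) (u : String)
    (hnn : ∀ v ∈ nn, ∀ r, rank v = some r → 0 ≤ r) :
    genBest rank (some (0, u)) nn = some (0, u) := by
  induction nn with
  | nil => rfl
  | cons v vs ih =>
    simp only [genBest]
    cases hr : rank v with
    | none => exact ih (fun w hw => hnn w (by simp [hw]))
    | some r =>
      have h0 : 0 ≤ r := hnn v (by simp) r hr
      have : ¬ (r < 0) := by omega
      simp only [this, if_false]
      exact ih (fun w hw => hnn w (by simp [hw]))

lemma genBest_first_zero (rank : String → Option Int) (nn : List String) (v0 : String)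
    (acc : Option (Int × String))
    (hacc : acc = none ∨ ∃ br bv, acc = some (br, bv) ∧ 0 < br)
    (hnn : ∀ v ∈ nn, ∀ r, rank v = some r → 0 ≤ r)
    (hfind : nn.find? (fun v => rank v == some 0) = some v0) :
    genBest rank acc nn = some (0, v0) := by
  induction nn generalizing acc with
  | nil => simp at hfind
  | cons v vs ih =>
    have hnn' : ∀ w ∈ vs, ∀ r, rank w = some r → 0 ≤ r :=
      fun w hw => hnn w (by simp [hw])
    simp only [genBest]
    by_cases hv : rank v = some 0
    · have hv0 : v = v0 := by
        rw [List.find?_cons_of_pos (by simp [hv])] at hfind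
        simpa using hfind
      subst hv0
      rcases hacc with h | ⟨br, bv, h, hbr⟩
      · subst h
        simp only [hv]
        exact genBest_stay_zero rank vs v hnn'
      · subst h
        simp only [hv]
        have : (0 : Int) < br := hbr
        simp only [this, if_true]
        exact genBest_stay_zero rank vs v hnn'
    · have hfind' : vs.find? (fun v => rank v == some 0) = some v0 := by
        rw [List.find?_cons_of_neg (by simp [hv])] at hfind
        exact hfind
      cases hr : rank v with
      | none => exact ih acc hacc hnn' hfind'
      | some r =>
        have h0 : 0 ≤ r := hnn v (by simp) r hr
        have hrpos : 0 < r := by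
          rcases lt_or_eq_of_le h0 with h | h
          · exact h
          · exact absurd (by rw [hr, ← h]) hv
        rcases hacc with h | ⟨br, bv, h, hbr⟩
        · subst h
          exact ih (some (r, v)) (Or.inr ⟨r, v, rfl, hrpos⟩) hnn' hfind'
        · subst h
          by_cases hlt : r < br
          · simp only [hlt, if_true]
            exact ih (some (r, v)) (Or.inr ⟨r, v, rfl, hrpos⟩) hnn' hfind'
          · simp only [hlt, if_false]
            exact ih (some (br, bv)) (Or.inr ⟨br, bv, rfl, hbr⟩) hnn' hfind'

lemma genBest_shift (rank : String → Option Int) (nn : List String)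
    (acc : Option (Int × String)) :
    genBest (fun v => (rank v).map (· + 1)) (acc.map (fun p => (p.1 + 1, p.2))) nn =
      (genBest rank acc nn).map (fun p => (p.1 + 1, p.2)) := by
  induction nn generalizing acc with
  | nil => rfl
  | cons v vs ih =>
    simp only [genBest]
    cases hr : rank v with
    | none => simp only [Option.map_none]; exact ih acc
    | some r =>
      simp only [Option.map_some]
      cases acc with
      | none => exact ih (some (r, v))
      | some p =>
        obtain ⟨br, bv⟩ := p
        simp only [Option.map_some]
        by_cases hlt : r < br
        · have : r + 1 < br + 1 := by omega
          simp only [hlt, this, if_true]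
          exact ih (some (r, v))
        · have : ¬ (r + 1 < br + 1) := by omega
          simp only [hlt, this, if_false]
          exact ih (some (br, bv))

lemma find?_congr_mem {α : Type} (p q : α → Bool) (l : List α)
    (h : ∀ x ∈ l, p x = q x) : l.find? p = l.find? q := by
  induction l with
  | nil => rfl
  | cons x xs ih =>
    simp only [List.find?]
    rw [h x (by simp)]
    cases q x
    · exact ih (fun y hy => h y (by simp [hy]))
    · rfl

lemma find?_eq_head?_filter {α : Type} (q : α → Bool) (l : List α) :
    l.find? q = (l.filter q).head? := by
  induction l with
  | nil => rfl
  | cons x xs ih =>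
    by_cases hx : q x
    · simp [List.find?_cons_of_pos hx, List.filter_cons, hx]
    · have hx' : q x = false := by simpa using hx
      rw [List.find?_cons_of_neg (by simp [hx']), List.filter_cons, hx']
      simpa using ih

-- the key lemma: A's preference loop equals B's argmin pass
lemma main_lemma (pref nn : List String) :
    aPrefLoop nn pref =
      (genBest (fun v => findIdxFrom (PySem.Str.lower v) pref 0) none nn).map Prod.snd := by
  induction pref generalizing nn with
  | nil =>
    rw [genBest_none (fun v => findIdxFrom (PySem.Str.lower v) [] 0) nn none (fun v _ => rfl)]
    rfl
  | cons p ps ih =>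
    have hrank : ∀ v ∈ nn,
        findIdxFrom (PySem.Str.lower v) (p :: ps) 0 =
          (if PySem.Str.lower v == PySem.Str.lower p then some 0
           else (findIdxFrom (PySem.Str.lower v) ps 0).map (· + 1)) := by
      intro v _
      simp only [findIdxFrom]
      by_cases h : PySem.Str.lower p = PySem.Str.lower v
      · simp [h]
      · have h1 : ¬ (PySem.Str.lower p == PySem.Str.lower v) = true := by simp [h]
        have h2 : ¬ (PySem.Str.lower v == PySem.Str.lower p) = true := by
          simp only [beq_iff_eq]
          exact fun he => h he.symm
        simp only [h1, h2, if_false, Bool.false_eq_true]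
        have := findIdxFrom_shift (PySem.Str.lower v) ps 0
        simpa using this
    rw [genBest_congr_mem _ _ nn none hrank]
    cases hf : nn.find? (fun v => PySem.Str.lower v == PySem.Str.lower p) with
    | some v0 =>
      -- some value matches p : both sides pick the first matching value
      have hnonneg : ∀ v ∈ nn, ∀ r,
          (if PySem.Str.lower v == PySem.Str.lower p then some 0
           else (findIdxFrom (PySem.Str.lower v) ps 0).map (· + 1)) = some r → 0 ≤ r := by
        intro v _ r h
        split at h
        · simp at h; omega
        · cases hm : findIdxFrom (PySem.Str.lower v) ps 0 with
          | none => rw [hm] at h; simp at h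
          | some r' =>
            rw [hm] at h
            simp at h
            have := findIdxFrom_ge (PySem.Str.lower v) ps 0 r' hm
            omega
      have hfind0 : nn.find?
          (fun v => (if PySem.Str.lower v == PySem.Str.lower p then some 0
           else (findIdxFrom (PySem.Str.lower v) ps 0).map (· + 1)) == some (0 : Int)) = some v0 := by
        rw [find?_congr_mem _ _ nn ?_]
        · exact hf
        · intro v _
          by_cases hm : PySem.Str.lower v == PySem.Str.lower p
          · simp [hm]
          · simp only [hm, Bool.false_eq_true, if_false]
            cases hfi : findIdxFrom (PySem.Str.lower v) ps 0 with
            | none => simp [hm]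
            | some r' =>
              have := findIdxFrom_ge (PySem.Str.lower v) ps 0 r' hfi
              have hne0 : ¬ (r' + 1 = (0 : Int)) := by omega
              simp [hm, hne0]
      rw [genBest_first_zero _ nn v0 none (Or.inl rfl) hnonneg hfind0]
      have : (nn.filter (fun v => PySem.Str.lower v == PySem.Str.lower p)).head? = some v0 := by
        rw [← find?_eq_head?_filter]; exact hf
      simp only [aPrefLoop]
      cases hflt : nn.filter (fun v => PySem.Str.lower v == PySem.Str.lower p) with
      | nil => rw [hflt] at this; simp at this
      | cons m rest =>
        rw [hflt] at this
        simp at this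
        simp [this]
    | none =>
      -- no value matches p : A recurses; B's ranks are all shifted by one
      have hnone : ∀ v ∈ nn, ¬ (PySem.Str.lower v == PySem.Str.lower p) := by
        intro v hv
        have := List.find?_eq_none.mp hf v hv
        simpa using this
      have hshift : ∀ v ∈ nn,
          (if PySem.Str.lower v == PySem.Str.lower p then some 0
           else (findIdxFrom (PySem.Str.lower v) ps 0).map (· + 1)) =
            (findIdxFrom (PySem.Str.lower v) ps 0).map (· + 1) := by
        intro v hv
        simp [hnone v hv]
      rw [genBest_congr_mem _ _ nn none hshift]
      have hfilter : nn.filter (fun v => PySem.Str.lower v == PySem.Str.lower p) = [] := by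
        apply List.filter_eq_nil_iff.mpr
        intro v hv
        simpa using hnone v hv
      simp only [aPrefLoop, hfilter]
      rw [ih nn]
      have := genBest_shift (fun v => findIdxFrom (PySem.Str.lower v) ps 0) nn none
      simp only [Option.map_none] at this
      rw [this]
      cases genBest (fun v => findIdxFrom (PySem.Str.lower v) ps 0) none nn with
      | none => rfl
      | some p => rfl

-- ===== VERDICT (by name: the statement is the Claim_ definition above) =====
theorem pick_preferred_py_spec : Claim_equal_pick_preferred_py := by
  intro values preference fallback_strategy _
  unfold Spec_pick_preferred_py
  unfold pick_preferred_py pick_preferred_py_alt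
  simp only []
  set nn := values.filter (fun v => !(v == "") && !(v == "-")) with hnn
  by_cases he : nn.isEmpty
  · simp [he]
  · simp only [he, if_false]
    rw [bBestLoop_eq_genBest]
    have hrank : (fun v => (bPrefRank preference).get? (PySem.Str.lower v)) =
        (fun v => findIdxFrom (PySem.Str.lower v) preference 0) := by
      funext v; exact bPrefRank_get? preference (PySem.Str.lower v)
    rw [hrank, main_lemma]
    cases genBest (fun v => findIdxFrom (PySem.Str.lower v) preference 0) none nn with
    | none => rfl
    | some p => rfl
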